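-- pv_equiv track=rewrite | github.com/ntrutuo1/VulnMngSys | vulnmngsys_app/modules/common.py | extract_last_directive_value
-- ===== SOURCE A (Python) =====
-- def extract_last_directive_value(raw_text: str, directive: str) -> str | None:
--     matched_value: str | None = None
--     lookup = directive.lower()
--     for line in raw_text.splitlines():
--         stripped = line.strip()
--         if not stripped or stripped.startswith("#"):
--             continue
--         content = stripped.split("#", 1)[0].strip()
--         if not content:
--             continue
--         parts = content.split()
--         if not parts:
--             continue
--         key = parts[0].lower()
--         if key == lookup:
--             matched_value = " ".join(parts[1:]).strip()
--     return matched_value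
-- ===== SOURCE B (Python) =====
-- def extract_last_directive_value(raw_text: str, directive: str) -> str | None:
--     lookup = directive.lower()
--     for line in reversed(raw_text.splitlines()):
--         tokens = line.split("#", 1)[0].split()
--         if tokens and tokens[0].lower() == lookup:
--             return " ".join(tokens[1:])
--     return None
-- ===== Notes on version B (the rewrite author's own statement) =====
-- stated objective: simpler
-- what changed: Replaces the forward scan with an overwritten accumulator by a reverse scan that returns on the first match, and collapses the strip/startswith('#')/strip/empty-check chain per line into a single split-before-'#'-then-whitespace-split whose empty token list subsumes all the skip cases.
import Mathlib
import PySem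

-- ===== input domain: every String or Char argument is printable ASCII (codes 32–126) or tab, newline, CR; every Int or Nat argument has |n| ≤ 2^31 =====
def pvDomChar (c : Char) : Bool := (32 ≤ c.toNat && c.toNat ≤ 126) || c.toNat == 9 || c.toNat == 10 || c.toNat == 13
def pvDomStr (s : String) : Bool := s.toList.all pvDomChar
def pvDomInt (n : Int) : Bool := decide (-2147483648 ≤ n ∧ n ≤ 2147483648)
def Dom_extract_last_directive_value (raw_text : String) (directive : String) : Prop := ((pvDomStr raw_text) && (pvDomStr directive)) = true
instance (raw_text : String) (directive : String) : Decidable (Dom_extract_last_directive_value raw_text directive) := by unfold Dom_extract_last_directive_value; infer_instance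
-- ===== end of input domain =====

-- B replaces A's forward scan with an overwritten accumulator by a reverse scan returning on the
-- first match, and folds A's per-line strip/'#'-comment/empty checks into one split-then-tokenize
-- step (objective: simpler).

-- ===== PORT A =====
-- A's per-line body, extracted as a helper (the fold over the lines is below, unchanged in structure).
-- stripped.split("#", 1)[0]: "#" ≠ "" so splitMax? is some, and a split result is never the empty
-- list, so indexing [0] is total and ported as .headD.
def pvStepA (lookup : String) (matched_value : Option String) (line : String) : Option String :=
  let stripped := PySem.Str.strip line
  if stripped = "" ∨ PySem.Str.startswith stripped "#" = true then matched_value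
  else
    let content := PySem.Str.strip (((PySem.Str.splitMax? stripped "#" 1).getD []).headD "")
    if content = "" then matched_value
    else
      match PySem.Str.split₀ content with
      | [] => matched_value
      | p0 :: rest =>
        if PySem.Str.lower p0 = lookup then some (PySem.Str.strip (PySem.Str.join " " rest))
        else matched_value

def extract_last_directive_value (raw_text : String) (directive : String) : Option String :=
  let lookup := PySem.Str.lower directive
  (PySem.Str.splitlines raw_text).foldl (pvStepA lookup) none

-- ===== PORT B =====
-- B's loop body: tokens = line.split("#", 1)[0].split(); match check; early return.
def pvBodyB (lookup : String) (line : String) : Option String :=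
  match PySem.Str.split₀ (((PySem.Str.splitMax? line "#" 1).getD []).headD "") with
  | [] => none
  | t :: ts => if PySem.Str.lower t = lookup then some (PySem.Str.join " " ts) else none

-- the 'for line in reversed(...)' loop with early return
def pvGoB (lookup : String) : List String → Option String
  | [] => none
  | line :: rest =>
    match pvBodyB lookup line with
    | some v => some v
    | none => pvGoB lookup rest

def extract_last_directive_value_alt (raw_text : String) (directive : String) : Option String :=
  pvGoB (PySem.Str.lower directive) (PySem.Str.splitlines raw_text).reverse

-- ===== PRECONDITION & SPEC =====
def Spec_extract_last_directive_value (raw_text : String) (directive : String) (out : Option String) : Prop := out = extract_last_directive_value_alt raw_text directive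
instance (raw_text : String) (directive : String) (out : Option String) : Decidable (Spec_extract_last_directive_value raw_text directive out) := by unfold Spec_extract_last_directive_value; infer_instance

-- ===== CLAIM (what is proved, stated in full; the proofs are below) =====
def Claim_equal_extract_last_directive_value : Prop := ∀ (raw_text : String) (directive : String), Dom_extract_last_directive_value raw_text directive → Spec_extract_last_directive_value raw_text directive (extract_last_directive_value raw_text directive)

-- ===== LEMMAS AND PROOFS =====


def pvW : List Char → List (List Char)
  | [] => []
  | c :: r =>
    if PySem.Chars.isspace c then pvW r
    else (c :: r.takeWhile (fun d => !PySem.Chars.isspace d)) :: pvW (r.dropWhile (fun d => !PySem.Chars.isspace d))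
termination_by l => l.length
decreasing_by
  all_goals
    have h := List.length_dropWhile_le (fun d => !PySem.Chars.isspace d) r
    simp
    try omega

theorem split₀_go_eq (cs : List Char) : ∀ (cur : List Char) (acc : List (List Char)),
    PySem.Chars.split₀.go cs cur acc =
      acc.reverse ++ (if cur = [] then pvW cs
        else (cur.reverse ++ cs.takeWhile (fun d => !PySem.Chars.isspace d)) ::
          pvW (cs.dropWhile (fun d => !PySem.Chars.isspace d))) := by
  induction cs with
  | nil =>
    intro cur acc
    simp only [PySem.Chars.split₀.go, pvW, List.isEmpty_iff]
    split <;> simp_all [pvW]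
  | cons c r ih =>
    intro cur acc
    rw [PySem.Chars.split₀.go]
    by_cases hc : PySem.Chars.isspace c
    · simp only [hc, if_true, List.isEmpty_iff]
      by_cases hcur : cur = []
      · subst hcur; rw [if_pos rfl, ih]; simp [pvW, hc]
      · rw [if_neg hcur, ih]
        simp [hcur, pvW, hc, List.takeWhile_cons, List.dropWhile_cons]
    · simp only [hc, if_false, Bool.false_eq_true]
      rw [ih]
      by_cases hcur : cur = []
      · subst hcur; simp [pvW, hc, List.takeWhile_cons, List.dropWhile_cons]
      · simp [hcur, pvW, hc, List.takeWhile_cons, List.dropWhile_cons]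

theorem split₀_eq_pvW (cs : List Char) : PySem.Chars.split₀ cs = pvW cs := by
  rw [PySem.Chars.split₀, split₀_go_eq]; simp

theorem pvW_allspace (cs : List Char) (h : ∀ c ∈ cs, PySem.Chars.isspace c) : pvW cs = [] := by
  induction cs with
  | nil => simp [pvW]
  | cons c r ih =>
    have : PySem.Chars.isspace c := h c (by simp)
    rw [pvW, if_pos this]; exact ih (fun x hx => h x (by simp [hx]))

theorem pvW_ws_append (ws cs : List Char) (h : ∀ c ∈ ws, PySem.Chars.isspace c) :
    pvW (ws ++ cs) = pvW cs := by
  induction ws with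
  | nil => rfl
  | cons c r ih =>
    have : PySem.Chars.isspace c := h c (by simp)
    rw [List.cons_append, pvW, if_pos this]; exact ih (fun x hx => h x (by simp [hx]))

theorem pvW_append_ws (cs ws : List Char) (h : ∀ c ∈ ws, PySem.Chars.isspace c) :
    pvW (cs ++ ws) = pvW cs := by
  have hwsT : List.takeWhile (fun d => !PySem.Chars.isspace d) ws = [] := by
    cases ws with
    | nil => rfl
    | cons w t => rw [List.takeWhile_cons, if_neg (by simp [h w (by simp)])]
  have hwsD : List.dropWhile (fun d => !PySem.Chars.isspace d) ws = ws := by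
    cases ws with
    | nil => rfl
    | cons w t => rw [List.dropWhile_cons, if_neg (by simp [h w (by simp)])]
  induction cs using pvW.induct with
  | case1 => simpa [pvW] using pvW_allspace ws h
  | case2 c r hc ih => rw [List.cons_append, pvW, if_pos hc, ih, pvW, if_pos hc]
  | case3 c r hc ih =>
    rw [List.cons_append, pvW, if_neg hc, pvW, if_neg hc]
    rw [List.takeWhile_append, List.dropWhile_append]
    by_cases hall : (List.dropWhile (fun d => !PySem.Chars.isspace d) r).isEmpty
    · simp only [List.isEmpty_iff] at hall
      have hrall : List.takeWhile (fun d => !PySem.Chars.isspace d) r = r := by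
        have := List.takeWhile_append_dropWhile (p := fun d => !PySem.Chars.isspace d) (l := r)
        simpa [hall] using this
      rw [if_pos (by rw [hrall]), if_pos (by simp [hall]), hwsT, hwsD, hrall, hall]
      rw [pvW_allspace ws h]
      simp [pvW]
    · simp only [List.isEmpty_iff] at hall
      have hlen : ¬ (List.takeWhile (fun d => !PySem.Chars.isspace d) r).length = r.length := by
        intro hlen
        have hc2 := congrArg List.length
          (List.takeWhile_append_dropWhile (p := fun d => !PySem.Chars.isspace d) (l := r))
        rw [List.length_append, hlen] at hc2
        have : (List.dropWhile (fun d => !PySem.Chars.isspace d) r).length = 0 := by omega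
        exact hall (List.length_eq_zero_iff.mp this)
      rw [if_neg hlen, if_neg (by simpa [List.isEmpty_iff] using hall), ih]

theorem pvW_strip (cs : List Char) : pvW (PySem.Chars.strip cs) = pvW cs := by
  have h1 : cs = List.takeWhile PySem.Chars.isspace cs ++ PySem.Chars.lstrip cs :=
    (List.takeWhile_append_dropWhile).symm
  have h2 : PySem.Chars.lstrip cs =
      PySem.Chars.rstrip (PySem.Chars.lstrip cs) ++
        (List.takeWhile PySem.Chars.isspace (PySem.Chars.lstrip cs).reverse).reverse := by
    rw [PySem.Chars.rstrip]
    conv_lhs => rw [← List.reverse_reverse (PySem.Chars.lstrip cs),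
      ← List.takeWhile_append_dropWhile (p := PySem.Chars.isspace) (l := (PySem.Chars.lstrip cs).reverse)]
    rw [List.reverse_append]
  rw [PySem.Chars.strip]
  conv_rhs => rw [h1]
  rw [pvW_ws_append _ _ (fun c hc => List.mem_takeWhile_imp hc)]
  conv_rhs => rw [h2]
  rw [pvW_append_ws _ _ (fun c hc => by
    have := List.mem_reverse.mp hc
    exact List.mem_takeWhile_imp this)]

theorem pvW_words (cs : List Char) : ∀ w ∈ pvW cs, w ≠ [] ∧ ∀ c ∈ w, PySem.Chars.isspace c = false := by
  induction cs using pvW.induct with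
  | case1 => simp [pvW]
  | case2 c r hc ih => rw [pvW, if_pos hc]; exact ih
  | case3 c r hc ih =>
    rw [pvW, if_neg hc]
    intro w hw
    rcases List.mem_cons.mp hw with h | h
    · subst h
      refine ⟨by simp, ?_⟩
      intro d hd
      rcases List.mem_cons.mp hd with h | h
      · subst h; simpa using hc
      · simpa using List.mem_takeWhile_imp h
    · exact ih w h

-- heads of the pieces: line.split('#', 1)[0] is the prefix before the first '#'
theorem splitOnMax_go_hash (cs : List Char) : ∀ (fuel : Nat) (cur : List Char) (acc : List (List Char)),
    cs.length < fuel →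
    PySem.Chars.splitOnMax.go ['#'] fuel 1 cs cur acc =
      acc.reverse ++
        (if List.dropWhile (fun d => !(d == '#')) cs = [] then [cur.reverse ++ cs]
         else [cur.reverse ++ cs.takeWhile (fun d => !(d == '#')),
               (List.dropWhile (fun d => !(d == '#')) cs).tail]) := by
  induction cs with
  | nil =>
    intro fuel cur acc hf
    cases fuel with
    | zero => omega
    | succ f => rw [PySem.Chars.splitOnMax.go.eq_def]; simp
  | cons c r ih =>
    intro fuel cur acc hf
    cases fuel with
    | zero => omega
    | succ f =>
      rw [PySem.Chars.splitOnMax.go.eq_def]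
      simp only []
      by_cases hc : c = '#'
      · subst hc
        have hpre : List.isPrefixOf ['#'] ('#' :: r) = true := by simp [List.isPrefixOf]
        have hgo : ∀ (g : Nat) (acc2 : List (List Char)),
            PySem.Chars.splitOnMax.go ['#'] g 0 r [] acc2 = (r :: acc2).reverse := by
          intro g acc2
          cases g with
          | zero => rw [PySem.Chars.splitOnMax.go.eq_def]; simp
          | succ g2 => rw [PySem.Chars.splitOnMax.go.eq_def]; cases r <;> simp
        simp only [hpre, if_pos, if_neg (by omega : ¬ (1 : Nat) = 0), if_true,
          show (['#'] : List Char).length = 1 from rfl, show (1:Nat) - 1 = 0 from rfl,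
          List.drop_succ_cons, List.drop_zero]
        rw [hgo]
        simp [List.dropWhile_cons, List.takeWhile_cons]
      · have hpre : ¬ List.isPrefixOf ['#'] (c :: r) = true := by
          simp [List.isPrefixOf]
          intro h
          exact absurd h.symm hc
        rw [if_neg (by omega : ¬ (1 : Nat) = 0), if_neg hpre,
          ih f (c :: cur) acc (by simpa using Nat.lt_of_succ_lt_succ hf)]
        have hq : (!(c == '#')) = true := by simp [hc]
        simp only [List.dropWhile_cons, List.takeWhile_cons, hq, if_true]
        split <;> simp

theorem head_splitOnMax (cs : List Char) :
    (PySem.Chars.splitOnMax cs ['#'] 1).headD [] = cs.takeWhile (fun d => !(d == '#')) := by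
  rw [PySem.Chars.splitOnMax, if_neg (by norm_num)]
  norm_num
  rw [splitOnMax_go_hash cs (cs.length + 1) [] [] (by omega)]
  split
  · rename_i h
    have : List.takeWhile (fun d => !(d == '#')) cs = cs := by
      have := List.takeWhile_append_dropWhile (p := fun d => !(d == '#')) (l := cs)
      simpa [h] using this
    simp [this]
  · simp

theorem takeWhile_all {α : Type} (p : α → Bool) (l : List α) (h : ∀ c ∈ l, p c) :
    List.takeWhile p l = l := by
  induction l with
  | nil => rfl
  | cons c t ih =>
    rw [List.takeWhile_cons, if_pos (h c (by simp))]
    rw [ih (fun x hx => h x (by simp [hx]))]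

theorem space_ne_hash (c : Char) (h : PySem.Chars.isspace c) : (!(c == '#')) = true := by
  have : ¬ c = '#' := by
    intro hc; subst hc
    simp [PySem.Chars.isspace] at h
  simp [this]

theorem pvW_takeWhile_strip (cs : List Char) :
    pvW (List.takeWhile (fun d => !(d == '#')) (PySem.Chars.strip cs)) =
      pvW (List.takeWhile (fun d => !(d == '#')) cs) := by
  have hts : ∀ c ∈ List.takeWhile PySem.Chars.isspace cs, PySem.Chars.isspace c :=
    fun c hc => List.mem_takeWhile_imp hc
  -- step 1: peel the leading whitespace off cs
  have h1 : List.takeWhile (fun d => !(d == '#')) cs =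
      List.takeWhile PySem.Chars.isspace cs ++
        List.takeWhile (fun d => !(d == '#')) (PySem.Chars.lstrip cs) := by
    conv_lhs => rw [← List.takeWhile_append_dropWhile (p := PySem.Chars.isspace) (l := cs)]
    rw [List.takeWhile_append,
      if_pos (by rw [takeWhile_all _ _ (fun c hc => space_ne_hash c (hts c hc))])]
    rfl
  rw [h1, pvW_ws_append _ _ hts]
  -- step 2: peel the trailing whitespace off lstrip cs
  have h2 : PySem.Chars.lstrip cs =
      PySem.Chars.rstrip (PySem.Chars.lstrip cs) ++
        (List.takeWhile PySem.Chars.isspace (PySem.Chars.lstrip cs).reverse).reverse := by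
    rw [PySem.Chars.rstrip]
    conv_lhs => rw [← List.reverse_reverse (PySem.Chars.lstrip cs),
      ← List.takeWhile_append_dropWhile (p := PySem.Chars.isspace) (l := (PySem.Chars.lstrip cs).reverse)]
    rw [List.reverse_append]
  have htw : ∀ c ∈ (List.takeWhile PySem.Chars.isspace (PySem.Chars.lstrip cs).reverse).reverse,
      PySem.Chars.isspace c := fun c hc => List.mem_takeWhile_imp (List.mem_reverse.mp hc)
  rw [PySem.Chars.strip]
  conv_rhs => rw [h2]
  rw [List.takeWhile_append]
  by_cases hlen : (List.takeWhile (fun d => !(d == '#')) (PySem.Chars.rstrip (PySem.Chars.lstrip cs))).length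
      = (PySem.Chars.rstrip (PySem.Chars.lstrip cs)).length
  · rw [if_pos hlen]
    have hall : List.takeWhile (fun d => !(d == '#')) (PySem.Chars.rstrip (PySem.Chars.lstrip cs)) =
        PySem.Chars.rstrip (PySem.Chars.lstrip cs) :=
      (List.takeWhile_sublist _).eq_of_length hlen
    rw [pvW_append_ws _ _ (fun c hc =>
      htw c ((List.takeWhile_sublist _).mem hc)), hall]
  · rw [if_neg hlen]

-- joining the split words back with single spaces yields a string with no leading/trailing space
theorem join_cons (s a : List Char) (l : List (List Char)) :
    PySem.Chars.join s (a :: l) = a ++ (if l = [] then [] else s ++ PySem.Chars.join s l) := by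
  cases l with
  | nil => simp [PySem.Chars.join, List.intercalate]
  | cons b t => simp [PySem.Chars.join, List.intercalate, List.intersperse]

theorem dropWhile_all_false {α : Type} (p : α → Bool) (l : List α) (h : ∀ c ∈ l, p c = false) :
    List.dropWhile p l = l := by
  cases l with
  | nil => rfl
  | cons c t => rw [List.dropWhile_cons, if_neg (by simp [h c (by simp)])]

theorem rstrip_append_ne (x y : List Char) (h : PySem.Chars.rstrip y ≠ []) :
    PySem.Chars.rstrip (x ++ y) = x ++ PySem.Chars.rstrip y := by
  rw [PySem.Chars.rstrip, List.reverse_append, List.dropWhile_append]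
  have : ¬ (List.dropWhile PySem.Chars.isspace y.reverse).isEmpty = true := by
    simp only [List.isEmpty_iff]
    intro he
    exact h (by rw [PySem.Chars.rstrip, he]; rfl)
  rw [if_neg this, List.reverse_append, List.reverse_reverse, PySem.Chars.rstrip]

theorem rstrip_all_nonspace (w : List Char) (h : ∀ c ∈ w, PySem.Chars.isspace c = false) :
    PySem.Chars.rstrip w = w := by
  rw [PySem.Chars.rstrip, dropWhile_all_false _ _ (fun c hc => h c (List.mem_reverse.mp hc)),
    List.reverse_reverse]

theorem rstrip_join (ts : List (List Char))
    (h : ∀ w ∈ ts, w ≠ [] ∧ ∀ c ∈ w, PySem.Chars.isspace c = false) :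
    PySem.Chars.rstrip (PySem.Chars.join [' '] ts) = PySem.Chars.join [' '] ts := by
  induction ts with
  | nil => rfl
  | cons w rest ih =>
    rw [join_cons]
    cases rest with
    | nil =>
      simp only [if_true, List.append_nil, reduceIte]
      exact rstrip_all_nonspace w (h w (by simp)).2
    | cons w2 t2 =>
      have hrest : ∀ x ∈ w2 :: t2, x ≠ [] ∧ ∀ c ∈ x, PySem.Chars.isspace c = false :=
        fun x hx => h x (by simp [List.mem_cons] at hx ⊢; tauto)
      have hne : PySem.Chars.join [' '] (w2 :: t2) ≠ [] := by
        rw [join_cons]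
        have := (hrest w2 (by simp)).1
        intro he
        rcases List.append_eq_nil_iff.mp he with ⟨h1, _⟩
        exact this h1
      have hr2 : PySem.Chars.rstrip (PySem.Chars.join [' '] (w2 :: t2)) =
          PySem.Chars.join [' '] (w2 :: t2) := ih hrest
      rw [if_neg (by simp)]
      rw [show w ++ ([' '] ++ PySem.Chars.join [' '] (w2 :: t2)) =
        (w ++ [' ']) ++ PySem.Chars.join [' '] (w2 :: t2) by simp]
      rw [rstrip_append_ne _ _ (by rw [hr2]; exact hne), hr2]

theorem strip_join (ts : List (List Char))
    (h : ∀ w ∈ ts, w ≠ [] ∧ ∀ c ∈ w, PySem.Chars.isspace c = false) :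
    PySem.Chars.strip (PySem.Chars.join [' '] ts) = PySem.Chars.join [' '] ts := by
  rw [PySem.Chars.strip]
  have hl : PySem.Chars.lstrip (PySem.Chars.join [' '] ts) = PySem.Chars.join [' '] ts := by
    cases ts with
    | nil => rfl
    | cons w rest =>
      rw [join_cons]
      obtain ⟨hne, hns⟩ := h w (by simp)
      cases w with
      | nil => exact absurd rfl hne
      | cons c w' =>
        rw [List.cons_append, PySem.Chars.lstrip, List.dropWhile_cons,
          if_neg (by simp [hns c (by simp)])]
  rw [hl]
  exact rstrip_join ts h

-- ===== Str-level glue =====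

theorem headD_map_ofList_toList (l : List (List Char)) :
    ((l.map String.ofList).headD "").toList = l.headD [] := by
  cases l <;> simp

theorem before_hash_toList (s : String) :
    (((PySem.Str.splitMax? s "#" 1).getD []).headD "").toList
      = s.toList.takeWhile (fun d => !(d == '#')) := by
  rw [PySem.Str.splitMax?, PySem.Chars.splitMax?,
    show ("#" : String).toList = ['#'] from by simp]
  rw [if_neg (by simp)]
  simp only [Option.map_some, Option.getD_some]
  rw [headD_map_ofList_toList, head_splitOnMax]

theorem split₀_map_pvW (s : String) :
    (PySem.Str.split₀ s).map String.toList = pvW s.toList := by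
  rw [PySem.Str.split₀, List.map_map, ← split₀_eq_pvW]
  simp [Function.comp_def]

theorem tokensB_eq (line : String) :
    (PySem.Str.split₀ (((PySem.Str.splitMax? line "#" 1).getD []).headD "")).map String.toList
      = pvW (line.toList.takeWhile (fun d => !(d == '#'))) := by
  rw [split₀_map_pvW, before_hash_toList]

theorem partsA_eq (line : String) :
    (PySem.Str.split₀ (PySem.Str.strip
        (((PySem.Str.splitMax? (PySem.Str.strip line) "#" 1).getD []).headD ""))).map String.toList
      = pvW (line.toList.takeWhile (fun d => !(d == '#'))) := by
  rw [split₀_map_pvW, PySem.Str.toList_strip, before_hash_toList, PySem.Str.toList_strip,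
    pvW_strip, pvW_takeWhile_strip]

theorem split₀_empty : PySem.Str.split₀ "" = [] := by
  have h : PySem.Chars.split₀ ("" : String).toList = [] := by
    rw [split₀_eq_pvW]
    simp [pvW]
  rw [PySem.Str.split₀, h]
  rfl

theorem pvStepA_eq_body (lookup : String) (acc : Option String) (line : String) :
    pvStepA lookup acc line =
      match pvBodyB lookup line with
      | some v => some v
      | none => acc := by
  have hinj : Function.Injective (List.map String.toList) :=
    List.map_injective_iff.mpr (fun a b h => String.toList_inj.mp h)
  have hparts : PySem.Str.split₀ (PySem.Str.strip
        (((PySem.Str.splitMax? (PySem.Str.strip line) "#" 1).getD []).headD ""))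
      = PySem.Str.split₀ (((PySem.Str.splitMax? line "#" 1).getD []).headD "") := by
    apply hinj
    rw [partsA_eq, tokensB_eq]
  by_cases h1 : PySem.Str.strip line = ""
  · have hstrip : PySem.Chars.strip line.toList = [] := by
      rw [← PySem.Str.toList_strip, h1]; rfl
    have hB0 : PySem.Str.split₀ (((PySem.Str.splitMax? line "#" 1).getD []).headD "") = [] := by
      apply List.map_eq_nil_iff.mp
      rw [tokensB_eq, ← pvW_takeWhile_strip, hstrip]
      simp [pvW]
    simp only [pvStepA, pvBodyB, hB0]
    rw [if_pos (Or.inl h1)]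
  · by_cases h2 : PySem.Str.startswith (PySem.Str.strip line) "#" = true
    · have hpre : ['#'] <+: PySem.Chars.strip line.toList := by
        rw [PySem.Str.startswith_eq] at h2
        have h2' : PySem.Chars.startswith (PySem.Chars.strip line.toList) ['#'] = true := by
          simpa [PySem.Str.startswith_eq, PySem.Str.toList_strip] using h2
        exact (PySem.Chars.startswith_iff _ _).mp h2'
      obtain ⟨t, ht⟩ := hpre
      have htw : List.takeWhile (fun d => !(d == '#'))
          (PySem.Chars.strip line.toList) = [] := by
        rw [← ht]; simp
      have hB0 : PySem.Str.split₀ (((PySem.Str.splitMax? line "#" 1).getD []).headD "") = [] := by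
        apply List.map_eq_nil_iff.mp
        rw [tokensB_eq, ← pvW_takeWhile_strip, htw]
        simp [pvW]
      simp only [pvStepA, pvBodyB, hB0]
      rw [if_pos (Or.inr h2)]
    · simp only [pvStepA, pvBodyB]
      rw [if_neg (not_or.mpr ⟨h1, h2⟩)]
      by_cases h3 : PySem.Str.strip
          (((PySem.Str.splitMax? (PySem.Str.strip line) "#" 1).getD []).headD "") = ""
      · rw [if_pos h3]
        have hB0 : PySem.Str.split₀ (((PySem.Str.splitMax? line "#" 1).getD []).headD "") = [] := by
          rw [← hparts, h3, split₀_empty]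
        rw [hB0]
      · rw [if_neg h3, hparts]
        cases hs : PySem.Str.split₀ (((PySem.Str.splitMax? line "#" 1).getD []).headD "") with
        | nil => rfl
        | cons p0 rest =>
          dsimp only
          by_cases h4 : PySem.Str.lower p0 = lookup
          · have hmap := tokensB_eq line
            rw [hs] at hmap
            have hrest : ∀ w ∈ rest.map String.toList,
                w ≠ [] ∧ ∀ c ∈ w, PySem.Chars.isspace c = false := by
              intro w hw
              apply pvW_words (line.toList.takeWhile (fun d => !(d == '#')))
              rw [← hmap]
              exact List.mem_cons_of_mem _ hw
            have hj : PySem.Str.strip (PySem.Str.join " " rest) = PySem.Str.join " " rest := by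
              apply String.toList_inj.mp
              rw [PySem.Str.toList_strip, PySem.Str.toList_join,
                show (" " : String).toList = [' '] from by simp]
              exact strip_join _ hrest
            rw [if_pos h4, if_pos h4, hj]
          · rw [if_neg h4, if_neg h4]

theorem pvGoB_append (lookup : String) (xs : List String) (l : String) :
    pvGoB lookup (xs ++ [l]) =
      match pvGoB lookup xs with
      | some v => some v
      | none => pvBodyB lookup l := by
  induction xs with
  | nil =>
    simp only [List.nil_append, pvGoB]
    cases pvBodyB lookup l <;> rfl
  | cons x xs ih =>
    rw [List.cons_append, pvGoB, pvGoB, ih]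
    cases pvBodyB lookup x <;> simp

theorem foldl_eq_goB (lookup : String) (ls : List String) (acc : Option String) :
    ls.foldl (pvStepA lookup) acc =
      match pvGoB lookup ls.reverse with
      | some v => some v
      | none => acc := by
  induction ls generalizing acc with
  | nil => rfl
  | cons l ls ih =>
    rw [List.foldl_cons, ih, List.reverse_cons, pvGoB_append, pvStepA_eq_body]
    cases pvGoB lookup ls.reverse
    · cases pvBodyB lookup l <;> rfl
    · rfl

-- ===== VERDICT (by name: the statement is the Claim_ definition above) =====
theorem extract_last_directive_value_spec : Claim_equal_extract_last_directive_value := by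
  intro raw_text directive _
  unfold Spec_extract_last_directive_value
  rw [extract_last_directive_value, extract_last_directive_value_alt, foldl_eq_goB]
  cases pvGoB (PySem.Str.lower directive) (PySem.Str.splitlines raw_text).reverse <;> rfl
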